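-- pv_equiv track=rewrite | github.com/Idosho1/Search-Engines | tokenizer.py | shortWord
-- ===== SOURCE A (Python) =====
-- vowels = ['a','e','i','o','u']
--
-- def shortWord(word):
--     # remove leading cosonants
--     i = 0
--     while i < len(word) and word[i] not in vowels:
--         i += 1
--     word = word[i:]
--
--     # remove trailing vowels
--     i = len(word)-1
--     while i >= 0 and word[i] in vowels:
--         i -= 1
--     word = word[:i+1]
--
--     # count number of vowel cosonant parts (m)
--     m = 0
--     vowel = True
--     for ch in word:
--         if ch not in vowels:
--             if vowel:
--                 vowel = False
--         else:
--             if not vowel: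
--                 vowel = True
--                 m += 1
--
--     if not vowel:
--         m += 1
--
--     return m == 1
-- ===== SOURCE B (Python) =====
-- def shortWord(word):
--     # compress the word into runs of vowel-ness (True = vowel run, False = consonant run)
--     runs = []
--     prev = None
--     for ch in word:
--         v = ch in 'aeiou'
--         if v != prev:
--             runs.append(v)
--             prev = v
--     # drop a leading consonant run and a trailing vowel run
--     if runs and runs[0] == False:
--         runs = runs[1:]
--     if runs and runs[-1] == True:
--         runs = runs[:-1]
--     return runs == [True, False]
-- ===== Notes on version B (the rewrite author's own statement) =====
-- stated objective: alternative
-- what changed: A trims leading consonants and trailing vowels in two extra scans and then runs a two-variable counting state machine; B compresses the word once into its runs of vowel-ness, trims the run list, and compares it to [True, False].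
import Mathlib
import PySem

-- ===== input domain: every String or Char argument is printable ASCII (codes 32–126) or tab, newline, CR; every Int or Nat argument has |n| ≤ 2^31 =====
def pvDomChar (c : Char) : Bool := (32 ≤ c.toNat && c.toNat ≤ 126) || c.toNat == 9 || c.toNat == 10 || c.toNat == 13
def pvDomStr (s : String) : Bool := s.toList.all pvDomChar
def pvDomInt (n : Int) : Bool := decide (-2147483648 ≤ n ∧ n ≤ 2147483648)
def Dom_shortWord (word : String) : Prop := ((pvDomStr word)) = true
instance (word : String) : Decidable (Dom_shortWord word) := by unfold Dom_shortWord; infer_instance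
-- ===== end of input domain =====

-- B replaces A's three passes (two trimming scans plus a counting state machine) by a single
-- run-length compression of the word followed by trimming and comparing the run list (objective: alternative).

-- ===== PORT A =====
def vowelsA : List Char := ['a', 'e', 'i', 'o', 'u']

-- while i < len(word) and word[i] not in vowels: i += 1; word = word[i:]
def dropLeadCons : List Char → List Char
  | [] => []
  | c :: cs => if c ∈ vowelsA then c :: cs else dropLeadCons cs

-- while i >= 0 and word[i] in vowels: i -= 1; word = word[:i+1]  (scan from the right = scan reverse)
def dropRevVow : List Char → List Char
  | [] => []
  | c :: cs => if c ∈ vowelsA then dropRevVow cs else c :: cs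

-- body of A's counting for-loop, state (m, vowel)
def stepA (s : Int × Bool) (ch : Char) : Int × Bool :=
  if ch ∉ vowelsA then
    (if s.2 then (s.1, false) else s)
  else
    (if !s.2 then (s.1 + 1, true) else s)

def shortWord (word : String) : Bool :=
  let w1 := dropLeadCons word.toList
  let w2 := (dropRevVow w1.reverse).reverse
  let s := w2.foldl stepA (0, true)
  let m := if !s.2 then s.1 + 1 else s.1
  m == 1

-- ===== PORT B =====
-- body of B's for-loop, state (runs, prev)
def stepB (s : List Bool × Option Bool) (ch : Char) : List Bool × Option Bool :=
  let v : Bool := decide (ch ∈ ['a', 'e', 'i', 'o', 'u'])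
  if some v ≠ s.2 then (s.1 ++ [v], some v) else s

def shortWord_alt (word : String) : Bool :=
  let runs := (word.toList.foldl stepB ([], none)).1
  let runs := if runs.head? = some false then runs.tail else runs
  let runs := if runs.getLast? = some true then runs.dropLast else runs
  runs == [true, false]

-- ===== PRECONDITION & SPEC =====
def Spec_shortWord (word : String) (out : Bool) : Prop := out = shortWord_alt word
instance (word : String) (out : Bool) : Decidable (Spec_shortWord word out) := by unfold Spec_shortWord; infer_instance

-- ===== CLAIM (what is proved, stated in full; the proofs are below) =====
def Claim_equal_shortWord : Prop := ∀ (word : String), Dom_shortWord word → Spec_shortWord word (shortWord word)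

-- ===== LEMMAS AND PROOFS =====

def isV (c : Char) : Bool := decide (c ∈ vowelsA)

-- A's counting loop, as a recursion over the vowel-ness list (including the final "+1 if not vowel")
def mDone : Bool → List Bool → Int
  | v, [] => if v then 0 else 1
  | v, b :: bs => if b then (if v then mDone true bs else 1 + mDone true bs) else mDone false bs

-- B's run-length compression, as a recursion (prev = p)
def compressFrom : Option Bool → List Bool → List Bool
  | _, [] => []
  | p, b :: bs => if some b = p then compressFrom p bs else b :: compressFrom (some b) bs

def endP : Option Bool → List Bool → Option Bool
  | p, [] => p
  | _, b :: bs => endP (some b) bs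

-- B's trailing trim + final comparison
def chk2 (rs : List Bool) : Bool := (if rs.getLast? = some true then rs.dropLast else rs) == [true, false]

theorem map_dropLeadCons (l : List Char) :
    (dropLeadCons l).map isV = (l.map isV).dropWhile (fun b => !b) := by
  induction l with
  | nil => rfl
  | cons c cs ih =>
    by_cases h : c ∈ vowelsA <;>
      simp [dropLeadCons, h, isV, ih]

theorem map_dropRevVow (l : List Char) :
    (dropRevVow l).map isV = (l.map isV).dropWhile (fun b => b) := by
  induction l with
  | nil => rfl
  | cons c cs ih =>
    by_cases h : c ∈ vowelsA <;>
      simp [dropRevVow, h, isV, ih]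

theorem foldA (l : List Char) : ∀ (m : Int) (v : Bool),
    (if !(l.foldl stepA (m, v)).2 then (l.foldl stepA (m, v)).1 + 1
     else (l.foldl stepA (m, v)).1) = m + mDone v (l.map isV) := by
  induction l with
  | nil => intro m v; cases v <;> simp [mDone]
  | cons c cs ih =>
    intro m v
    rw [List.foldl_cons, List.map_cons]
    by_cases h : c ∈ vowelsA
    · have hv : isV c = true := by simp [isV, h]
      cases v
      · have hs : stepA (m, false) c = (m + 1, true) := by simp [stepA, h]
        rw [hs, ih, hv]; simp [mDone]; omega
      · have hs : stepA (m, true) c = (m, true) := by simp [stepA, h]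
        rw [hs, ih, hv]; simp [mDone]
    · have hv : isV c = false := by simp [isV, h]
      cases v
      · have hs : stepA (m, false) c = (m, false) := by simp [stepA, h]
        rw [hs, ih, hv]; simp [mDone]
      · have hs : stepA (m, true) c = (m, false) := by simp [stepA, h]
        rw [hs, ih, hv]; simp [mDone]

theorem foldB (l : List Char) (rs : List Bool) (p : Option Bool) :
    l.foldl stepB (rs, p) = (rs ++ compressFrom p (l.map isV), endP p (l.map isV)) := by
  induction l generalizing rs p with
  | nil => simp [compressFrom, endP]
  | cons c cs ih =>
    by_cases h : some (isV c) = p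
    · have hstep : stepB (rs, p) c = (rs, p) := by
        simp [stepB, isV, vowelsA] at h ⊢
        simp [← h]
      simp [List.foldl_cons, hstep, ih, compressFrom, endP, h]
    · have hstep : stepB (rs, p) c = (rs ++ [isV c], some (isV c)) := by
        simp [stepB, isV, vowelsA] at h ⊢
        simp [h]
      simp [List.foldl_cons, hstep, ih, compressFrom, endP, h]

theorem compressFrom_some (b : Bool) (bs : List Bool) :
    compressFrom (some b) bs =
      (if (compressFrom none bs).head? = some b then (compressFrom none bs).tail
       else compressFrom none bs) := by
  cases bs with
  | nil => simp [compressFrom]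
  | cons c cs =>
    by_cases h : c = b <;> simp [compressFrom, h]

theorem mDone_nonneg (bs : List Bool) : ∀ (v : Bool), 0 ≤ mDone v bs := by
  induction bs with
  | nil => intro v; cases v <;> simp [mDone]
  | cons b bs ih =>
    intro v
    cases b
    · show 0 ≤ mDone false bs
      exact ih false
    · cases v
      · show 0 ≤ 1 + mDone true bs
        have := ih true; omega
      · show 0 ≤ mDone true bs
        exact ih true

theorem mDone_false_pos (bs : List Bool) : 1 ≤ mDone false bs := by
  induction bs with
  | nil => simp [mDone]
  | cons b bs ih =>
    cases b
    · show 1 ≤ mDone false bs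
      exact ih
    · show 1 ≤ 1 + mDone true bs
      have := mDone_nonneg bs true; omega

theorem mDone_true_zero_iff (bs : List Bool) :
    mDone true bs = 0 ↔ compressFrom (some true) bs = [] := by
  induction bs with
  | nil => simp [mDone, compressFrom]
  | cons b bs ih =>
    cases b <;> simp [mDone, compressFrom]
    · have := mDone_false_pos bs; omega
    · exact ih

theorem chk2_TFT (rs : List Bool) : chk2 ([true, false, true] ++ rs) = rs.isEmpty := by
  cases rs with
  | nil => rfl
  | cons x xs =>
    have hlen : ∀ l : List Bool, l.length ≠ 2 → (l == [true, false]) = false := by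
      intro l hl
      rw [beq_eq_false_iff_ne]
      intro hc
      exact hl (by rw [hc]; rfl)
    unfold chk2
    simp only [List.isEmpty_cons]
    split
    · apply hlen
      rw [List.dropLast_append]
      simp
    · apply hlen
      simp

theorem core3 (bs : List Bool) :
    ((mDone false bs == 1) : Bool) = chk2 (true :: false :: compressFrom (some false) bs) := by
  induction bs with
  | nil => rfl
  | cons b bs ih =>
    cases b
    · simpa [mDone, compressFrom] using ih
    · show ((1 + mDone true bs == 1) : Bool) = chk2 ([true, false, true] ++ compressFrom (some true) bs)
      rw [chk2_TFT]
      by_cases h : mDone true bs = 0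
      · have hc : compressFrom (some true) bs = [] := (mDone_true_zero_iff bs).1 h
        rw [h, hc]
        rfl
      · have hc : compressFrom (some true) bs ≠ [] := fun hc => h ((mDone_true_zero_iff bs).2 hc)
        have h1 : ((1 + mDone true bs == 1) : Bool) = false := by
          rw [beq_eq_false_iff_ne]; omega
        have h2 : (compressFrom (some true) bs).isEmpty = false := by
          simpa [List.isEmpty_iff] using hc
        rw [h1, h2]

theorem core2 (bs : List Bool) :
    ((mDone true bs == 1) : Bool) = chk2 (true :: compressFrom (some true) bs) := by
  induction bs with
  | nil => rfl
  | cons b bs ih =>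
    cases b
    · show ((mDone false bs == 1) : Bool) = chk2 (true :: false :: compressFrom (some false) bs)
      exact core3 bs
    · simpa [mDone, compressFrom] using ih

-- B's full post-processing of the compressed run list
def postB (rs : List Bool) : Bool :=
  chk2 (if rs.head? = some false then rs.tail else rs)

theorem core (bs : List Bool) :
    ((mDone true (bs.dropWhile (fun b => !b)) == 1) : Bool) = postB (compressFrom none bs) := by
  induction bs with
  | nil => rfl
  | cons b bs ih =>
    cases b
    · show ((mDone true (bs.dropWhile (fun b => !b)) == 1) : Bool)
        = postB (false :: compressFrom (some false) bs)
      rw [ih]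
      unfold postB
      rw [compressFrom_some]
      simp
    · show ((mDone true (true :: bs) == 1) : Bool) = postB (true :: compressFrom (some true) bs)
      unfold postB
      simp only [List.head?_cons]
      rw [if_neg (by simp)]
      simpa [mDone] using core2 bs

theorem mDone_all_true (ts : List Bool) (h : ∀ b ∈ ts, b = true) (v : Bool) :
    mDone v ts = if v then 0 else 1 := by
  induction ts generalizing v with
  | nil => rfl
  | cons t ts ih =>
    have ht : t = true := h t (by simp)
    have h' : ∀ b ∈ ts, b = true := fun b hb => h b (by simp [hb])
    subst ht
    cases v <;> simp [mDone, ih h']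

theorem mDone_append_trues (ts : List Bool) (h : ∀ b ∈ ts, b = true) (ys : List Bool) (v : Bool) :
    mDone v (ys ++ ts) = mDone v ys := by
  induction ys generalizing v with
  | nil => simp [mDone_all_true ts h v, mDone]
  | cons y ys ih => cases y <;> simp [mDone, ih]

theorem mDone_trimTrail (bs : List Bool) (v : Bool) :
    mDone v ((bs.reverse.dropWhile (fun b => b)).reverse) = mDone v bs := by
  have hsplit : bs = (bs.reverse.dropWhile (fun b => b)).reverse ++ (bs.reverse.takeWhile (fun b => b)).reverse := by
    conv_lhs => rw [← List.reverse_reverse bs,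
      ← List.takeWhile_append_dropWhile (p := fun b => b) (l := bs.reverse)]
    rw [List.reverse_append]
  have htrue : ∀ b ∈ (bs.reverse.takeWhile (fun b => b)).reverse, b = true := by
    intro b hb
    rw [List.mem_reverse] at hb
    simpa using List.mem_takeWhile_imp hb
  conv_rhs => rw [hsplit]
  rw [mDone_append_trues _ htrue]

-- ===== VERDICT (by name: the statement is the Claim_ definition above) =====
theorem shortWord_spec : Claim_equal_shortWord := by
  intro word _
  show shortWord word = shortWord_alt word
  simp only [shortWord, shortWord_alt]
  rw [foldA, foldB]
  simp only [List.nil_append, Int.zero_add]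
  rw [List.map_reverse, map_dropRevVow, List.map_reverse, map_dropLeadCons,
      mDone_trimTrail, core]
  rfl
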